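-- pv_equiv track=rewrite | github.com/hradzevich/Diplom_2 | helper.py | create_order_with_ingredients_payload
-- ===== SOURCE A (Python) =====
-- def create_order_with_ingredients_payload(list_of_ingredients):
--     buns, mains, sauces = [], [], []
--     for ingr in list_of_ingredients:
--         if ingr["type"] == "bun":
--             buns.append(ingr["_id"])
--         if ingr["type"] == "main":
--             mains.append(ingr["_id"])
--         if ingr["type"] == "sauce":
--             sauces.append(ingr["_id"])
--
--     order_ingredients = []
--     if buns:
--         order_ingredients.append(buns[0])
--     if mains:
--         order_ingredients.append(mains[0])
--     if sauces:
--         order_ingredients.append(sauces[0])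
--
--     return order_ingredients
-- ===== SOURCE B (Python) =====
-- def create_order_with_ingredients_payload(list_of_ingredients):
--     result = []
--     for t in ("bun", "main", "sauce"):
--         for ingr in list_of_ingredients:
--             if ingr["type"] == t:
--                 result.append(ingr["_id"])
--                 break
--     return result
-- ===== Notes on version B (the rewrite author's own statement) =====
-- stated objective: alternative
-- what changed: Replaces A's single pass that fills three accumulator lists and then picks their heads by three staged first-match scans, one per type in output order, each stopping at its first hit and reading only that ingredient's _id.
import Mathlib
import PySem

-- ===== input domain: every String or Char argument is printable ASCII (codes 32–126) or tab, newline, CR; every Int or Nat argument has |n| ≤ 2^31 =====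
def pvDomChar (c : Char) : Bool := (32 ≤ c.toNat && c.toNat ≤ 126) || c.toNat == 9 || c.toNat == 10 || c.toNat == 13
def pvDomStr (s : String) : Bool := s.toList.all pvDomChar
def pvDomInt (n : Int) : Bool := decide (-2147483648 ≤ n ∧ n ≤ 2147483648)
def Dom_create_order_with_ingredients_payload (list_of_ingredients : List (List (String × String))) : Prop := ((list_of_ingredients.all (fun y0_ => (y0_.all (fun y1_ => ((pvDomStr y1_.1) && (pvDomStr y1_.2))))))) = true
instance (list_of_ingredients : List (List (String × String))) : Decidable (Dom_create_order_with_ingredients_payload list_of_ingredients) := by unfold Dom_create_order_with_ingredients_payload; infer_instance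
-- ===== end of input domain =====

-- B replaces A's single pass with three accumulator lists by three staged
-- first-match scans, one per type in output order (objective: alternative).


-- ===== PORT A =====
-- dict access ingr["k"] is first-match lookup; Pre_ guarantees the key is present,
-- so the `.getD ""` default is never taken on admitted inputs.
def pvStepA (st : List String × List String × List String) (ingr : List (String × String)) :
    List String × List String × List String :=
  let t := (List.lookup "type" ingr).getD ""
  let buns := if t = "bun" then st.1 ++ [(List.lookup "_id" ingr).getD ""] else st.1
  let mains := if t = "main" then st.2.1 ++ [(List.lookup "_id" ingr).getD ""] else st.2.1
  let sauces := if t = "sauce" then st.2.2 ++ [(List.lookup "_id" ingr).getD ""] else st.2.2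
  (buns, mains, sauces)

def create_order_with_ingredients_payload (list_of_ingredients : List (List (String × String))) : List String :=
  let st := list_of_ingredients.foldl pvStepA ([], [], [])
  -- "if buns: order.append(buns[0])" etc.
  st.1.head?.toList ++ st.2.1.head?.toList ++ st.2.2.head?.toList

-- ===== PORT B =====
-- B's inner loop: scan for the first ingredient of type t, return its _id, break.
def pvFirstOfType (t : String) : List (List (String × String)) → Option String
  | [] => none
  | ingr :: rest =>
      if (List.lookup "type" ingr).getD "" = t
      then some ((List.lookup "_id" ingr).getD "")
      else pvFirstOfType t rest

def create_order_with_ingredients_payload_alt (list_of_ingredients : List (List (String × String))) : List String :=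
  ["bun", "main", "sauce"].foldl
    (fun result t => result ++ (pvFirstOfType t list_of_ingredients).toList) []

-- ===== PRECONDITION & SPEC =====
-- Pre_ excludes exactly the inputs on which Python A raises KeyError: an ingredient
-- without a "type" key, or an ingredient whose type is bun/main/sauce without "_id".
def Pre_create_order_with_ingredients_payload (list_of_ingredients : List (List (String × String))) : Prop :=
  ∀ ingr ∈ list_of_ingredients,
    (List.lookup "type" ingr).isSome = true ∧
    ((List.lookup "type" ingr = some "bun" ∨ List.lookup "type" ingr = some "main" ∨
      List.lookup "type" ingr = some "sauce") → (List.lookup "_id" ingr).isSome = true)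
instance (list_of_ingredients : List (List (String × String))) : Decidable (Pre_create_order_with_ingredients_payload list_of_ingredients) := by unfold Pre_create_order_with_ingredients_payload; infer_instance

def pvWitness_create_order_with_ingredients_payload : (List (List (String × String))) :=
  [[("type", "bun"), ("_id", "b1")], [("type", "sauce"), ("_id", "s1")], [("type", "drink")]]

def Spec_create_order_with_ingredients_payload (list_of_ingredients : List (List (String × String))) (out : List String) : Prop := out = create_order_with_ingredients_payload_alt list_of_ingredients
instance (list_of_ingredients : List (List (String × String))) (out : List String) : Decidable (Spec_create_order_with_ingredients_payload list_of_ingredients out) := by unfold Spec_create_order_with_ingredients_payload; infer_instance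

-- ===== CLAIM (what is proved, stated in full; the proofs are below) =====
def Claim_equal_create_order_with_ingredients_payload : Prop := ∀ (list_of_ingredients : List (List (String × String))), Dom_create_order_with_ingredients_payload list_of_ingredients → Pre_create_order_with_ingredients_payload list_of_ingredients → Spec_create_order_with_ingredients_payload list_of_ingredients (create_order_with_ingredients_payload list_of_ingredients)

-- ===== LEMMAS AND PROOFS =====
-- The head of each of A's accumulator lists after the fold is either the head it
-- started with or, starting empty, the first matching _id (= B's staged scan).
lemma pv_bun (l : List (List (String × String))) (xs ys zs : List String) :
    (l.foldl pvStepA (xs, ys, zs)).1.head? =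
      (match xs with | [] => pvFirstOfType "bun" l | a :: _ => some a) := by
  induction l generalizing xs ys zs with
  | nil => cases xs <;> simp [pvFirstOfType]
  | cons ingr rest ih =>
    simp only [List.foldl_cons, pvStepA, pvFirstOfType]
    cases xs with
    | nil => split_ifs <;> simp_all
    | cons a as => split_ifs <;> simp_all

lemma pv_main (l : List (List (String × String))) (xs ys zs : List String) :
    (l.foldl pvStepA (xs, ys, zs)).2.1.head? =
      (match ys with | [] => pvFirstOfType "main" l | a :: _ => some a) := by
  induction l generalizing xs ys zs with
  | nil => cases ys <;> simp [pvFirstOfType]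
  | cons ingr rest ih =>
    simp only [List.foldl_cons, pvStepA, pvFirstOfType]
    cases ys with
    | nil => split_ifs <;> simp_all
    | cons a as => split_ifs <;> simp_all

lemma pv_sauce (l : List (List (String × String))) (xs ys zs : List String) :
    (l.foldl pvStepA (xs, ys, zs)).2.2.head? =
      (match zs with | [] => pvFirstOfType "sauce" l | a :: _ => some a) := by
  induction l generalizing xs ys zs with
  | nil => cases zs <;> simp [pvFirstOfType]
  | cons ingr rest ih =>
    simp only [List.foldl_cons, pvStepA, pvFirstOfType]
    cases zs with
    | nil => split_ifs <;> simp_all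
    | cons a as => split_ifs <;> simp_all

-- ===== VERDICT (by name: the statement is the Claim_ definition above) =====
theorem create_order_with_ingredients_payload_spec : Claim_equal_create_order_with_ingredients_payload := by
  intro l _ _
  unfold Spec_create_order_with_ingredients_payload
  unfold create_order_with_ingredients_payload create_order_with_ingredients_payload_alt
  simp [List.foldl, pv_bun l [] [] [], pv_main l [] [] [], pv_sauce l [] [] []]
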